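-- pv_equiv track=rewrite | github.com/Tomer0013/bert-implementation | preprocessing.py | _strip_spaces
-- ===== SOURCE A (Python) =====
-- import collections
--
-- def _strip_spaces(text: str) -> tuple:
--     ns_chars = []
--     ns_to_s_map = collections.OrderedDict()
--     for i, c in enumerate(text):
--         if c == " ":
--             continue
--         ns_to_s_map[len(ns_chars)] = i
--         ns_chars.append(c)
--     ns_text = "".join(ns_chars)
--
--     return ns_text, ns_to_s_map
-- ===== SOURCE B (Python) =====
-- import collections
--
-- def _strip_spaces(text: str) -> tuple:
--     segments = text.split(" ")
--     ns_text = "".join(segments)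
--     ns_to_s_map = collections.OrderedDict()
--     j = 0
--     start = 0
--     for seg in segments:
--         for k in range(len(seg)):
--             ns_to_s_map[j] = start + k
--             j += 1
--         start += len(seg) + 1
--     return ns_text, ns_to_s_map
-- ===== Notes on version B (the rewrite author's own statement) =====
-- stated objective: alternative
-- what changed: B splits the text at space characters into segments, joins the segments for ns_text, and fills the map segment-by-segment with arithmetic index ranges (start+k), instead of A's single fused per-character loop that tests each char and keys the dict by the running list length.
import Mathlib
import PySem

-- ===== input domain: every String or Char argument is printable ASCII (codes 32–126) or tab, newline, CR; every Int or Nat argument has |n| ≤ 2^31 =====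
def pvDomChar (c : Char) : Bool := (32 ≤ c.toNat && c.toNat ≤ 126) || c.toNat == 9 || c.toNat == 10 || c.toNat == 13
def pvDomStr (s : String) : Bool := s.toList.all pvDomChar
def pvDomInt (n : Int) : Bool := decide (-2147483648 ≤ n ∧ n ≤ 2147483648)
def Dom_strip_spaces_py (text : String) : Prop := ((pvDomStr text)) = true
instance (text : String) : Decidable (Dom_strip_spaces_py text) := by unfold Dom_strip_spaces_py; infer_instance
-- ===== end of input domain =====

-- B re-implements A by splitting on " " and emitting per-segment index ranges instead of A's fused
-- per-character loop; same O(n) cost, different decomposition (objective: alternative).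

-- ===== PORT A =====
-- step of A's 'for i, c in enumerate(text)' loop (state: ns_chars, ns_to_s_map)
def aStep (acc : List Char × PySem.Dict Int Int) (p : Int × Char) : List Char × PySem.Dict Int Int :=
  if p.2 = ' ' then acc
  else (acc.1 ++ [p.2], acc.2.insert (acc.1.length : Int) p.1)

def strip_spaces_py (text : String) : String × (List (Int × Int)) :=
  let st := (PySem.List.enumerate text.toList 0).foldl aStep ([], PySem.Dict.empty)
  (String.ofList st.1, st.2.items)

-- ===== PORT B =====
-- body of B's inner 'for k in range(len(seg))' loop (state: ns_to_s_map, j; start captured)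
def bInner (start : Int) (a : PySem.Dict Int Int × Int) (k : Int) : PySem.Dict Int Int × Int :=
  (a.1.insert a.2 (start + k), a.2 + 1)

-- body of B's outer 'for seg in segments' loop (state: ns_to_s_map, j, start)
def bStep (acc : PySem.Dict Int Int × Int × Int) (seg : String) : PySem.Dict Int Int × Int × Int :=
  let inner := (PySem.List.pyRange 0 (PySem.Str.len seg) 1).foldl (bInner acc.2.2) (acc.1, acc.2.1)
  (inner.1, inner.2, acc.2.2 + PySem.Str.len seg + 1)

def strip_spaces_py_alt (text : String) : String × (List (Int × Int)) :=
  let segments := (PySem.Str.split? text " ").getD []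
  let ns_text := PySem.Str.join "" segments
  let st := segments.foldl bStep (PySem.Dict.empty, 0, 0)
  (ns_text, st.1.items)

-- ===== PRECONDITION & SPEC =====
def Spec_strip_spaces_py (text : String) (out : String × (List (Int × Int))) : Prop := out = strip_spaces_py_alt text
instance (text : String) (out : String × (List (Int × Int))) : Decidable (Spec_strip_spaces_py text out) := by unfold Spec_strip_spaces_py; infer_instance

-- ===== CLAIM (what is proved, stated in full; the proofs are below) =====
def Claim_equal_strip_spaces_py : Prop := ∀ (text : String), Dom_strip_spaces_py text → Spec_strip_spaces_py text (strip_spaces_py text)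

-- ===== LEMMAS AND PROOFS =====

-- the non-space characters of cs, in order
def keepNS : List Char → List Char
  | [] => []
  | c :: cs => if c = ' ' then keepNS cs else c :: keepNS cs

-- the (non-space index, original index) pairs of cs, original counter i, non-space counter j
def pairsSpec : List Char → Int → Int → List (Int × Int)
  | [], _, _ => []
  | c :: cs, i, j => if c = ' ' then pairsSpec cs (i + 1) j else (j, i) :: pairsSpec cs (i + 1) (j + 1)

-- the pairs B emits from a list of segments, start offset, non-space counter j
def bPairs : List (List Char) → Int → Int → List (Int × Int)
  | [], _, _ => []
  | seg :: rest, start, j =>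
      (List.range seg.length).map (fun k : Nat => (j + (k : Int), start + (k : Int)))
        ++ bPairs rest (start + seg.length + 1) (j + seg.length)

lemma modifyHead_fun_id {α : Type} (l : List α) : List.modifyHead (fun x => x) l = l := by
  cases l <;> simp

lemma go_space (fuel : Nat) : ∀ (l cur : List Char) (acc : List (List Char)), l.length < fuel →
    PySem.Chars.splitOn.go [' '] fuel l cur acc
      = acc.reverse ++ List.modifyHead (cur.reverse ++ ·) (List.splitOnP (fun c => c == ' ') l) := by
  induction fuel with
  | zero => intro l cur acc h; omega
  | succ n ih =>
    intro l cur acc h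
    cases l with
    | nil => simp [PySem.Chars.splitOn.go, List.splitOnP_nil]
    | cons c rest =>
      rw [PySem.Chars.splitOn.go.eq_def]
      simp only [List.isPrefixOf]
      by_cases hc : c = ' '
      · simp [hc, List.splitOnP_cons,
          ih rest [] (cur.reverse :: acc) (by simpa using Nat.lt_of_succ_lt_succ h),
          modifyHead_fun_id _]
      · have hne : (' ' == c) = false := by simp [Ne.symm hc]
        simp only [hne, Bool.false_and, Bool.false_eq_true, if_false]
        rw [ih rest (c :: cur) acc (by simpa using Nat.lt_of_succ_lt_succ h),
          List.splitOnP_cons]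
        have hcf : (c == ' ') = false := by simp [hc]
        rw [hcf]
        obtain ⟨h0, t0, ht⟩ := List.exists_cons_of_ne_nil (List.splitOnP_ne_nil (fun c => c == ' ') rest)
        simp [ht]

lemma split_space (cs : List Char) :
    PySem.Chars.split? cs [' '] = some (List.splitOnP (fun c => c == ' ') cs) := by
  simp [PySem.Chars.split?, PySem.Chars.splitOn, go_space (cs.length + 1) cs [] [] (by omega),
    modifyHead_fun_id _]

lemma intercalate_nil_flatten (ll : List (List Char)) : List.intercalate [] ll = ll.flatten := by
  induction ll with
  | nil => simp [List.intercalate]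
  | cons h t ih => simp [List.intercalate] at *; cases t <;> simp_all [List.intersperse]

lemma flatten_splitOnP (cs : List Char) :
    (List.splitOnP (fun c => c == ' ') cs).flatten = keepNS cs := by
  induction cs with
  | nil => simp [List.splitOnP_nil, keepNS]
  | cons c cs ih =>
    rw [List.splitOnP_cons]
    by_cases hc : c = ' '
    · simp [hc, keepNS, ih]
    · have hcf : (c == ' ') = false := by simp [hc]
      rw [hcf]
      obtain ⟨h0, t0, ht⟩ := List.exists_cons_of_ne_nil (List.splitOnP_ne_nil (fun c => c == ' ') cs)
      rw [ht] at ih ⊢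
      simp_all [keepNS]

lemma A_loop (cs : List Char) : ∀ (s : Int) (chars : List Char) (d : PySem.Dict Int Int),
    (∀ n : Int, (chars.length : Int) ≤ n → d.contains n = false) →
    ((PySem.List.enumerate cs s).foldl aStep (chars, d)).1 = chars ++ keepNS cs ∧
    ((PySem.List.enumerate cs s).foldl aStep (chars, d)).2.items
      = d.items ++ pairsSpec cs s (chars.length : Int) := by
  induction cs with
  | nil => intro s chars d h; simp [keepNS, pairsSpec]
  | cons c cs ih =>
    intro s chars d h
    rw [PySem.List.enumerate_cons]
    by_cases hc : c = ' '
    · have := ih (s + 1) chars d h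
      simp only [List.foldl_cons, aStep, hc, if_true, keepNS, pairsSpec] at this ⊢
      simpa using this
    · have hd : d.contains (chars.length : Int) = false := h _ le_rfl
      have hfresh : ∀ n : Int, (((chars ++ [c]).length : Int)) ≤ n →
          (d.insert (chars.length : Int) s).contains n = false := by
        intro n hn
        simp only [List.length_append, List.length_cons, List.length_nil] at hn
        push_cast at hn
        rw [PySem.Dict.contains_insert]
        have h1 : d.contains n = false := h n (by omega)
        have h2 : (n == (chars.length : Int)) = false := by
          simp only [beq_eq_false_iff_ne, ne_eq]; omega
        simp [h1, h2]
      have := ih (s + 1) (chars ++ [c]) (d.insert (chars.length : Int) s) hfresh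
      simp only [List.foldl_cons, aStep, hc, if_false, keepNS, pairsSpec] at this ⊢
      rcases this with ⟨h1, h2⟩
      constructor
      · rw [h1]; simp
      · rw [h2, PySem.Dict.items_insert_of_not_contains _ _ hd]
        have hlen : (((chars ++ [c]).length : Int)) = (chars.length : Int) + 1 := by
          simp
        rw [hlen]
        simp only [List.append_assoc, List.singleton_append]

lemma B_inner (start : Int) (n : Nat) : ∀ (d : PySem.Dict Int Int) (j : Int),
    (∀ m : Int, j ≤ m → d.contains m = false) →
    ((PySem.List.pyRange 0 (n : Int) 1).foldl (bInner start) (d, j)).1.items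
      = d.items ++ (List.range n).map (fun k : Nat => (j + (k : Int), start + (k : Int))) ∧
    ((PySem.List.pyRange 0 (n : Int) 1).foldl (bInner start) (d, j)).2 = j + n ∧
    (∀ m : Int, j + n ≤ m →
      ((PySem.List.pyRange 0 (n : Int) 1).foldl (bInner start) (d, j)).1.contains m = false) := by
  induction n with
  | zero =>
    intro d j h
    simp only [Nat.cast_zero, PySem.List.pyRange_zero]
    refine ⟨by simp, by simp, ?_⟩
    intro m hm
    exact h m (by omega)
  | succ n ih =>
    intro d j h
    have hsplit : PySem.List.pyRange 0 ((n + 1 : Nat) : Int) 1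
        = PySem.List.pyRange 0 (n : Int) 1 ++ [(n : Int)] := by
      have : ((n + 1 : Nat) : Int) = (n : Int) + 1 := by push_cast; ring
      rw [this, PySem.List.pyRange_one_succ_right (by positivity)]
    rw [hsplit, List.foldl_append]
    obtain ⟨h1, h2, h3⟩ := ih d j h
    set r := (PySem.List.pyRange 0 (n : Int) 1).foldl (bInner start) (d, j) with hr
    have hrc : r.1.contains (j + n) = false := h3 _ le_rfl
    refine ⟨?_, ?_, ?_⟩
    · simp only [List.foldl_cons, List.foldl_nil, bInner]
      rw [h2, PySem.Dict.items_insert_of_not_contains _ _ hrc, h1, List.range_succ]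
      simp
    · simp only [List.foldl_cons, List.foldl_nil, bInner]
      rw [h2]; push_cast; ring
    · intro m hm
      simp only [List.foldl_cons, List.foldl_nil, bInner]
      rw [PySem.Dict.contains_insert, h2]
      push_cast at hm
      have hmc : (m == j + (n : Int)) = false := by
        simp only [beq_eq_false_iff_ne, ne_eq]; omega
      have : r.1.contains m = false := h3 m (by omega)
      simp [hmc, this]

lemma B_loop (segs : List String) : ∀ (d : PySem.Dict Int Int) (j start : Int),
    (∀ m : Int, j ≤ m → d.contains m = false) →
    (segs.foldl bStep (d, j, start)).1.items
      = d.items ++ bPairs (segs.map String.toList) start j := by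
  induction segs with
  | nil => intro d j start h; simp [bPairs]
  | cons seg rest ih =>
    intro d j start h
    simp only [List.foldl_cons, List.map_cons, bPairs]
    have hl : PySem.Str.len seg = ((seg.toList.length : Nat) : Int) := by
      simp [PySem.Str.len_eq]
    obtain ⟨h1, h2, h3⟩ := B_inner start seg.toList.length d j h
    have hstep : bStep (d, j, start) seg =
        (((PySem.List.pyRange 0 ((seg.toList.length : Nat) : Int) 1).foldl (bInner start) (d, j)).1,
         j + seg.toList.length, start + seg.toList.length + 1) := by
      simp only [bStep, hl]
      refine Prod.ext rfl (Prod.ext ?_ rfl)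
      simpa using h2
    rw [hstep, ih _ _ _ h3, h1]
    simp [List.append_assoc]

lemma bPairs_splitOnP (cs : List Char) : ∀ (i j : Int),
    bPairs (List.splitOnP (fun c => c == ' ') cs) i j = pairsSpec cs i j := by
  induction cs with
  | nil => intro i j; simp [List.splitOnP_nil, bPairs, pairsSpec]
  | cons c cs ih =>
    intro i j
    rw [List.splitOnP_cons]
    by_cases hc : c = ' '
    · have hct : (c == ' ') = true := by simp [hc]
      rw [hct]
      simp only [if_true, bPairs, List.length_nil, List.range_zero,
        Nat.cast_zero, add_zero, pairsSpec, hc]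
      simpa using ih (i + 1) j
    · have hcf : (c == ' ') = false := by simp [hc]
      rw [hcf]
      obtain ⟨h0, t0, ht⟩ := List.exists_cons_of_ne_nil (List.splitOnP_ne_nil (fun c => c == ' ') cs)
      rw [ht]
      simp only [Bool.false_eq_true, if_false, List.modifyHead, bPairs, List.length_cons,
        pairsSpec, if_neg hc]
      have hih := ih (i + 1) (j + 1)
      rw [ht] at hih
      simp only [bPairs] at hih
      rw [List.range_succ_eq_map]
      simp only [List.map_cons, List.map_map, Nat.cast_zero, add_zero, List.cons_append]
      rw [← hih]
      congr 1
      congr 1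
      · apply List.map_congr_left
        intro a _
        simp only [Function.comp_apply, Prod.mk.injEq]
        constructor <;> push_cast <;> ring
      · congr 1 <;> push_cast <;> ring

-- ===== VERDICT (by name: the statement is the Claim_ definition above) =====
theorem strip_spaces_py_spec : Claim_equal_strip_spaces_py := by
  intro text _
  unfold Spec_strip_spaces_py strip_spaces_py strip_spaces_py_alt
  -- A's side
  obtain ⟨hA1, hA2⟩ := A_loop text.toList 0 [] PySem.Dict.empty
    (by intro n _; simp [PySem.Dict.contains_empty])
  -- B's segments
  have hsm := PySem.Str.split?_map text " "
  rw [show (" " : String).toList = [' '] from rfl, split_space] at hsm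
  obtain ⟨segs, hsegs⟩ : ∃ segs, PySem.Str.split? text " " = some segs := by
    cases hv : PySem.Str.split? text " " with
    | none => rw [hv] at hsm; simp at hsm
    | some segs => exact ⟨segs, rfl⟩
  rw [hsegs] at hsm
  simp only [Option.map_some, Option.some.injEq] at hsm
  have hB := B_loop segs PySem.Dict.empty 0 0
    (by intro m _; simp [PySem.Dict.contains_empty])
  rw [hsm, bPairs_splitOnP] at hB
  simp only [hsegs, Option.getD_some]
  refine Prod.ext ?_ ?_
  · -- the stripped strings agree
    apply String.toList_inj.mp
    rw [PySem.Str.toList_join, hsm]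
    simp only [hA1, List.nil_append, String.toList_ofList]
    rw [show ("" : String).toList = [] from rfl, PySem.Chars.join,
      intercalate_nil_flatten, flatten_splitOnP]
  · -- the maps agree
    simp only [hA2, hB]
    simp
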